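-- pv_equiv track=rewrite | github.com/NiceToMeeetU/ToGetReady | Code/weekly_contest/DualWeek_47.py | checkPowersOfThree
-- ===== SOURCE A (Python) =====
-- def checkPowersOfThree(n: int) -> bool:
--     """
--     5681. 判断一个数字是否可以表示成三的幂的和
--     给你一个整数 n ，如果你可以将 n 表示成若干个不同的三的幂之和，请你返回 true ，否则请返回 false 。
--     对于一个整数 y ，如果存在整数 x 满足 y == 3x ，我们称这个整数 y 是三的幂。
--     :param n:
--     :return:
--     """
--     while n > 1:
--         if n % 3 == 0:
--             n //= 3
--             continue
--         elif (n - 1) % 3 == 0: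
--             n = (n - 1) // 3
--             continue
--         else:
--             return False
--     return True
-- ===== SOURCE B (Python) =====
-- def checkPowersOfThree(n: int) -> bool:
--     # Greedy from the top: the largest power of 3 <= n must be in any
--     # representation by distinct powers (the smaller ones sum to less),
--     # so subtract it and walk the powers downward.
--     p = 1
--     while p * 3 <= n:
--         p *= 3
--     while n > 0 and p > 0:
--         if p <= n:
--             n -= p
--         p //= 3
--     return n == 0
-- ===== Notes on version B (the rewrite author's own statement) =====
-- stated objective: alternative
-- what changed: B replaces A's bottom-up base-3 digit stripping (repeated %3 and //3 from the low end) with a top-down greedy: it first grows the largest power of 3 not exceeding n, then walks the powers downward subtracting each one that still fits and succeeds iff the remainder reaches 0.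
-- intended difference: For negative n A's while-loop never runs so A returns True, while B's greedy finds no power of 3 to subtract and returns False; a negative number is not a sum of powers of 3, so B's value is the intended one. — e.g. on checkPowersOfThree(-1): A returns true, B returns false
import Mathlib
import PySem

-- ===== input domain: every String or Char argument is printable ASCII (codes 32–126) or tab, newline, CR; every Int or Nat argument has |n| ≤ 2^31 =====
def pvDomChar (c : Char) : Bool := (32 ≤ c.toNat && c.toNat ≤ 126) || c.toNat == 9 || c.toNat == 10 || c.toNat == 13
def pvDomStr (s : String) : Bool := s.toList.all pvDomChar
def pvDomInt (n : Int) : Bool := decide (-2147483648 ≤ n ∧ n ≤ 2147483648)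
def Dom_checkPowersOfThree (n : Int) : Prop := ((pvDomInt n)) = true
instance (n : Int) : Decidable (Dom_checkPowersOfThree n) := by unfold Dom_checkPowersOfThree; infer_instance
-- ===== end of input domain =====

-- B is a top-down greedy over powers of 3 (grow the largest power ≤ n, then subtract downward)
-- instead of A's bottom-up base-3 digit stripping; same asymptotic cost, different algorithm.

-- termination helpers (floor division by 3 shrinks a positive Int; the greedy's gap shrinks)
theorem pv_dec_fd (n : Int) (h : 0 < n) : (PySem.Int.floordiv n 3).toNat < n.toNat := by
  have h1 : PySem.Int.floordiv n 3 < n :=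
    (PySem.Int.floordiv_lt_iff_lt_mul (a := n) (q := n) (by norm_num)).mpr (by omega)
  exact (Int.toNat_lt_toNat h).mpr h1

theorem pv_dec_fd1 (n : Int) (h : 1 < n) : (PySem.Int.floordiv (n - 1) 3).toNat < n.toNat := by
  have h1 : PySem.Int.floordiv (n - 1) 3 < n :=
    (PySem.Int.floordiv_lt_iff_lt_mul (a := n - 1) (q := n) (by norm_num)).mpr (by omega)
  exact (Int.toNat_lt_toNat (by omega)).mpr h1

theorem pv_dec_grow (p n : Int) (h : 1 ≤ p ∧ p * 3 ≤ n) : (n - p * 3).toNat < (n - p).toNat :=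
  (Int.toNat_lt_toNat (by omega)).mpr (by omega)

-- ===== PORT A =====
def checkPowersOfThree (n : Int) : Bool :=
  if _h : n > 1 then
    if PySem.Int.mod n 3 == 0 then
      checkPowersOfThree (PySem.Int.floordiv n 3)
    else if PySem.Int.mod (n - 1) 3 == 0 then
      checkPowersOfThree (PySem.Int.floordiv (n - 1) 3)
    else
      false
  else
    true
termination_by n.toNat
decreasing_by
  · exact pv_dec_fd n (lt_trans zero_lt_one _h)
  · exact pv_dec_fd1 n _h

-- ===== PORT B =====
-- first loop of Source B: grow p to the largest power of 3 ≤ n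
-- ('1 ≤ p' is only a totality guard: p starts at 1 and only triples, so it is always true)
def pvGrow (p n : Int) : Int :=
  if _h : 1 ≤ p ∧ p * 3 ≤ n then pvGrow (p * 3) n else p
termination_by (n - p).toNat
decreasing_by exact pv_dec_grow p n _h

-- second loop of Source B: subtract each power that still fits, walking the powers down
def pvShrink (n p : Int) : Bool :=
  if _h : 0 < n ∧ 0 < p then
    pvShrink (if p ≤ n then n - p else n) (PySem.Int.floordiv p 3)
  else
    decide (n = 0)
termination_by p.toNat
decreasing_by exact pv_dec_fd p _h.2

def checkPowersOfThree_alt (n : Int) : Bool :=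
  pvShrink n (pvGrow 1 n)

-- ===== PRECONDITION & SPEC =====
-- For negative n A returns True (its while-loop never runs) while B's greedy returns False;
-- a negative number is not a sum of powers of 3, so B's value is the intended one.
def D_checkPowersOfThree (n : Int) : Prop := n < 0
instance (n : Int) : Decidable (D_checkPowersOfThree n) := by unfold D_checkPowersOfThree; infer_instance
def Spec_checkPowersOfThree (n : Int) (out : Bool) : Prop := ¬ D_checkPowersOfThree n → out = checkPowersOfThree_alt n
instance (n : Int) (out : Bool) : Decidable (Spec_checkPowersOfThree n out) := by unfold Spec_checkPowersOfThree; infer_instance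
def pvDiffWitness_checkPowersOfThree : Int := (-1)
def pvDiffWitnessOut_checkPowersOfThree : Bool × Bool := (true, false)

-- ===== CLAIM =====
def Claim_unchanged_checkPowersOfThree : Prop := ∀ (n : Int), Dom_checkPowersOfThree n → Spec_checkPowersOfThree n (checkPowersOfThree n)
def Claim_changed_checkPowersOfThree : Prop := Dom_checkPowersOfThree (pvDiffWitness_checkPowersOfThree) ∧ D_checkPowersOfThree (pvDiffWitness_checkPowersOfThree) ∧ checkPowersOfThree (pvDiffWitness_checkPowersOfThree) = pvDiffWitnessOut_checkPowersOfThree.1 ∧ checkPowersOfThree_alt (pvDiffWitness_checkPowersOfThree) = pvDiffWitnessOut_checkPowersOfThree.2 ∧ pvDiffWitnessOut_checkPowersOfThree.1 ≠ pvDiffWitnessOut_checkPowersOfThree.2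
def Claim_exact_checkPowersOfThree : Prop := ∀ (n : Int), Dom_checkPowersOfThree n → D_checkPowersOfThree n → checkPowersOfThree n ≠ checkPowersOfThree_alt n

-- ===== LEMMAS AND PROOFS =====

-- proof-side predicate: all base-3 digits of n are ≠ 2
def pvNoTwo (n : Int) : Bool :=
  if _h : 0 < n then (PySem.Int.mod n 3 != 2) && pvNoTwo (PySem.Int.floordiv n 3)
  else true
termination_by n.toNat
decreasing_by exact pv_dec_fd n _h

theorem pv_A_eq_noTwo (n : Int) : checkPowersOfThree n = pvNoTwo n := by
  induction n using checkPowersOfThree.induct with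
  | case1 n h hm ih =>
    have hm' : PySem.Int.mod n 3 = 0 := by simpa using hm
    rw [checkPowersOfThree, dif_pos h, if_pos hm, pvNoTwo, dif_pos (by omega : (0:Int) < n), ih, hm']
    simp
  | case2 n h hm hm1 ih =>
    have e1 := PySem.Int.floordiv_mul_add_mod n 3
    have e2 := PySem.Int.floordiv_mul_add_mod (n - 1) 3
    have b1 := PySem.Int.mod_lt (a := n) (b := 3) (by omega)
    have b2 := PySem.Int.mod_nonneg (a := n) (b := 3) (by omega)
    have b3 := PySem.Int.mod_lt (a := n - 1) (b := 3) (by omega)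
    have b4 := PySem.Int.mod_nonneg (a := n - 1) (b := 3) (by omega)
    have hm0 : PySem.Int.mod n 3 ≠ 0 := by simpa using hm
    have hm1' : PySem.Int.mod (n - 1) 3 = 0 := by simpa using hm1
    have hd : PySem.Int.mod n 3 = 1 := by omega
    have hq : PySem.Int.floordiv (n - 1) 3 = PySem.Int.floordiv n 3 := by omega
    rw [checkPowersOfThree, dif_pos h, if_neg hm, if_pos hm1, ih, hq]
    conv_rhs => rw [pvNoTwo]
    rw [dif_pos (by omega : (0:Int) < n), hd]
    simp
  | case3 n h hm hm1 =>
    have e1 := PySem.Int.floordiv_mul_add_mod n 3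
    have e2 := PySem.Int.floordiv_mul_add_mod (n - 1) 3
    have b1 := PySem.Int.mod_lt (a := n) (b := 3) (by omega)
    have b2 := PySem.Int.mod_nonneg (a := n) (b := 3) (by omega)
    have b3 := PySem.Int.mod_lt (a := n - 1) (b := 3) (by omega)
    have b4 := PySem.Int.mod_nonneg (a := n - 1) (b := 3) (by omega)
    have hm0 : PySem.Int.mod n 3 ≠ 0 := by simpa using hm
    have hm1' : PySem.Int.mod (n - 1) 3 ≠ 0 := by simpa using hm1
    have hd : PySem.Int.mod n 3 = 2 := by omega
    rw [checkPowersOfThree, dif_pos h, if_neg hm, if_neg hm1, pvNoTwo,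
      dif_pos (by omega : (0:Int) < n), hd]
    simp
  | case4 n h =>
    rw [checkPowersOfThree, dif_neg h]
    by_cases hn : 0 < n
    · have : n = 1 := by omega
      subst this
      rw [pvNoTwo, dif_pos (by omega : (0:Int) < 1),
        show PySem.Int.floordiv 1 3 = 0 from by decide, pvNoTwo,
        dif_neg (by omega : ¬ (0:Int) < 0)]
      decide
    · rw [pvNoTwo, dif_neg hn]

theorem pv_fd_pow (k : Nat) : PySem.Int.floordiv ((3:Int)^(k+1)) 3 = 3^k := by
  have e := PySem.Int.floordiv_mul_add_mod ((3:Int)^(k+1)) 3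
  have b1 := PySem.Int.mod_lt (a := (3:Int)^(k+1)) (b := 3) (by omega)
  have b2 := PySem.Int.mod_nonneg (a := (3:Int)^(k+1)) (b := 3) (by omega)
  have hp : ((3:Int))^(k+1) = 3^k * 3 := by rw [pow_succ]
  omega

theorem pv_noTwo_high (k : Nat) (n : Int) (h1 : 2 * 3^k ≤ n) (h2 : n < 3^(k+1)) :
    pvNoTwo n = false := by
  induction k generalizing n with
  | zero =>
    have : n = 2 := by simp at h1 h2; omega
    subst this
    rw [pvNoTwo, dif_pos (by omega : (0:Int) < 2),
      show PySem.Int.mod 2 3 = 2 from by decide]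
    simp
  | succ k ih =>
    have hp : ((3:Int))^(k+1) = 3^k * 3 := by rw [pow_succ]
    have hp2 : ((3:Int))^(k+2) = 3^k * 9 := by ring
    have ht : (0:Int) < 3^k := by positivity
    have e := PySem.Int.floordiv_mul_add_mod n 3
    have b1 := PySem.Int.mod_lt (a := n) (b := 3) (by omega)
    have b2 := PySem.Int.mod_nonneg (a := n) (b := 3) (by omega)
    rw [pvNoTwo, dif_pos (by omega : (0:Int) < n),
      ih (PySem.Int.floordiv n 3) (by omega) (by omega)]
    simp

theorem pv_noTwo_add_pow (k : Nat) (n : Int) (h0 : 0 ≤ n) (h1 : n < 3^k) :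
    pvNoTwo ((3:Int)^k + n) = pvNoTwo n := by
  induction k generalizing n with
  | zero =>
    have : n = 0 := by simp at h1; omega
    subst this
    rw [show ((3:Int)^0 + 0) = 1 from by norm_num, pvNoTwo,
      dif_pos (by omega : (0:Int) < 1),
      show PySem.Int.floordiv 1 3 = 0 from by decide, pvNoTwo,
      dif_neg (by omega : ¬ (0:Int) < 0)]
    decide
  | succ k ih =>
    have hp : ((3:Int))^(k+1) = 3^k * 3 := by rw [pow_succ]
    have ht : (0:Int) < 3^k := by positivity
    have em := PySem.Int.floordiv_mul_add_mod ((3:Int)^(k+1) + n) 3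
    have bm1 := PySem.Int.mod_lt (a := (3:Int)^(k+1) + n) (b := 3) (by omega)
    have bm2 := PySem.Int.mod_nonneg (a := (3:Int)^(k+1) + n) (b := 3) (by omega)
    have en := PySem.Int.floordiv_mul_add_mod n 3
    have bn1 := PySem.Int.mod_lt (a := n) (b := 3) (by omega)
    have bn2 := PySem.Int.mod_nonneg (a := n) (b := 3) (by omega)
    have hmod : PySem.Int.mod ((3:Int)^(k+1) + n) 3 = PySem.Int.mod n 3 := by omega
    have hfd : PySem.Int.floordiv ((3:Int)^(k+1) + n) 3 = 3^k + PySem.Int.floordiv n 3 := by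
      omega
    rw [pvNoTwo, dif_pos (by omega : (0:Int) < 3^(k+1) + n), hmod, hfd,
      ih (PySem.Int.floordiv n 3) (by omega) (by omega)]
    by_cases hn : 0 < n
    · conv_rhs => rw [pvNoTwo]
      rw [dif_pos hn]
    · have hn0 : n = 0 := by omega
      subst hn0
      rw [show PySem.Int.mod 0 3 = 0 from by decide,
        show PySem.Int.floordiv 0 3 = 0 from by decide, pvNoTwo,
        dif_neg (by omega : ¬ (0:Int) < 0)]
      decide

theorem pv_shrink_big (k : Nat) (m : Int) (h : 3 * 3^k ≤ m) : pvShrink m (3^k) = false := by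
  induction k generalizing m with
  | zero =>
    simp only [pow_zero] at h ⊢
    rw [pvShrink, dif_pos (by omega : 0 < m ∧ (0:Int) < 1),
      if_pos (by omega : (1:Int) ≤ m),
      show PySem.Int.floordiv 1 3 = 0 from by decide, pvShrink,
      dif_neg (by omega : ¬ (0 < m - 1 ∧ (0:Int) < 0))]
    simp; omega
  | succ k ih =>
    have hp : ((3:Int))^(k+1) = 3^k * 3 := by rw [pow_succ]
    have ht : (0:Int) < 3^k := by positivity
    rw [pvShrink, dif_pos (by constructor <;> omega), if_pos (by omega), pv_fd_pow]
    exact ih (m - 3^(k+1)) (by omega)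

theorem pv_shrink_spec (k : Nat) (n : Int) (h0 : 0 ≤ n) (h1 : n < 3^(k+1)) :
    pvShrink n ((3:Int)^k) = pvNoTwo n := by
  induction k generalizing n with
  | zero =>
    have h3 : n < 3 := by simpa using h1
    interval_cases n
    · rw [pvShrink, dif_neg (by omega : ¬ ((0:Int) < 0 ∧ (0:Int) < 3^0)), pvNoTwo,
        dif_neg (by omega : ¬ (0:Int) < 0)]
      decide
    · rw [pvShrink, pow_zero, dif_pos (by omega : (0:Int) < 1 ∧ (0:Int) < 1),
        if_pos (by omega : (1:Int) ≤ 1),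
        show PySem.Int.floordiv 1 3 = 0 from by decide, pvShrink,
        dif_neg (by omega : ¬ ((0:Int) < 1 - 1 ∧ (0:Int) < 0)), pvNoTwo,
        dif_pos (by omega : (0:Int) < 1),
        show PySem.Int.floordiv 1 3 = 0 from by decide, pvNoTwo,
        dif_neg (by omega : ¬ (0:Int) < 0)]
      decide
    · rw [pvShrink, pow_zero, dif_pos (by omega : (0:Int) < 2 ∧ (0:Int) < 1),
        if_pos (by omega : (1:Int) ≤ 2),
        show PySem.Int.floordiv 1 3 = 0 from by decide, pvShrink,
        dif_neg (by omega : ¬ ((0:Int) < 2 - 1 ∧ (0:Int) < 0)), pvNoTwo,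
        dif_pos (by omega : (0:Int) < 2),
        show PySem.Int.mod 2 3 = 2 from by decide]
      simp
  | succ k ih =>
    have hp : ((3:Int))^(k+1) = 3^k * 3 := by rw [pow_succ]
    have hp2 : ((3:Int))^(k+2) = 3^k * 9 := by ring
    have ht : (0:Int) < 3^k := by positivity
    by_cases hn : 0 < n
    · rw [pvShrink, dif_pos (by constructor <;> omega), pv_fd_pow]
      by_cases hlt : n < 3^(k+1)
      · rw [if_neg (by omega), ih n h0 hlt]
      · by_cases h2 : n < 2 * 3^(k+1)
        · rw [if_pos (by omega), ih (n - 3^(k+1)) (by omega) (by omega)]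
          conv_rhs => rw [show n = (3:Int)^(k+1) + (n - 3^(k+1)) from by ring]
          rw [pv_noTwo_add_pow (k+1) (n - 3^(k+1)) (by omega) (by omega)]
        · rw [if_pos (by omega), pv_shrink_big k (n - 3^(k+1)) (by omega),
            pv_noTwo_high (k+1) n (by omega) (by omega)]
    · have hn0 : n = 0 := by omega
      subst hn0
      rw [pvShrink, dif_neg (by omega : ¬ ((0:Int) < 0 ∧ 0 < (3:Int)^(k+1))), pvNoTwo,
        dif_neg (by omega : ¬ (0:Int) < 0)]
      decide

theorem pv_grow_pow (p n : Int) : ∀ k : Nat, p = 3^k → ∃ m : Nat, pvGrow p n = 3^m ∧ n < 3^(m+1) := by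
  refine pvGrow.induct n
    (fun p => ∀ k : Nat, p = 3^k → ∃ m : Nat, pvGrow p n = 3^m ∧ n < 3^(m+1)) ?_ ?_ p
  · intro p h ih k hp
    rw [pvGrow, dif_pos h]
    exact ih (k+1) (by rw [hp, pow_succ])
  · intro p h k hp
    rw [pvGrow, dif_neg h]
    refine ⟨k, hp, ?_⟩
    have ht : (0:Int) < 3^k := by positivity
    have hs : ((3:Int))^(k+1) = 3^k * 3 := by rw [pow_succ]
    have hn3 : ¬ p * 3 ≤ n := fun hle => h ⟨by omega, hle⟩
    omega

-- ===== VERDICT =====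
theorem checkPowersOfThree_spec : Claim_unchanged_checkPowersOfThree := by
  intro n _ hnd
  have h0 : 0 ≤ n := by unfold D_checkPowersOfThree at hnd; omega
  obtain ⟨m, hg, hb⟩ := pv_grow_pow 1 n 0 (by norm_num)
  unfold Spec_checkPowersOfThree at *
  show checkPowersOfThree n = checkPowersOfThree_alt n
  rw [checkPowersOfThree_alt, hg, pv_shrink_spec m n h0 hb, pv_A_eq_noTwo]

theorem checkPowersOfThree_changed : Claim_changed_checkPowersOfThree := by
  unfold Claim_changed_checkPowersOfThree pvDiffWitness_checkPowersOfThree pvDiffWitnessOut_checkPowersOfThree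
  refine ⟨by decide, by decide, ?_, ?_, by decide⟩
  · rw [checkPowersOfThree]; rw [dif_neg (by omega)]
  · rw [checkPowersOfThree_alt, pvGrow]; rw [dif_neg (by omega)]
    rw [pvShrink]; rw [dif_neg (by omega)]; decide

theorem checkPowersOfThree_tight : Claim_exact_checkPowersOfThree := by
  intro n _ hd
  unfold D_checkPowersOfThree at hd
  have hA : checkPowersOfThree n = true := by
    rw [checkPowersOfThree]; rw [dif_neg (by omega)]
  have hG : pvGrow 1 n = 1 := by rw [pvGrow]; rw [dif_neg (by omega)]
  have hB : checkPowersOfThree_alt n = false := by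
    rw [checkPowersOfThree_alt, hG, pvShrink]
    rw [dif_neg (by omega)]
    simp; omega
  rw [hA, hB]; simp
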